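-- pv_equiv track=rewrite | github.com/AurumYO/exercises_practice | pwb_ex126.py | sublists_generator
-- ===== SOURCE A (Python) =====
-- def sublists_generator(input_list):
--     # create copy of original list, new list list to store sub-lists, timer and loop counter to  loop through the list
--     user_list, sublists = list(input_list), [],
--     t, loop_counter = 0, len(user_list)
--     # loop through the copy of original list for as many times as the length of the list passed to the the function
--     while t < loop_counter:
--         for num in range(len(user_list)+1):
--             # add to the sub-lists part of the copy of original lists starting from the first position to the last
--             sublists.append(user_list[:num])
--         # increase the counter by 1 and delete first position from the copy of the original list
--         t += 1
--         user_list.pop(0)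
--     # clearing our sub-lists from duplicates and return the list of sub-lists
--     result = []
--     for item in sublists:
--         if item not in result:
--             result.append(item)
--     return result
-- ===== SOURCE B (Python) =====
-- def sublists_generator(input_list):
--     # Generate contiguous sublists directly by start/end indices (no mutation,
--     # no pop(0)); append each slice only on first encounter.
--     lst = list(input_list)
--     n = len(lst)
--     result = []
--     for i in range(n):
--         for j in range(i, n + 1):
--             candidate = lst[i:j]
--             if candidate not in result:
--                 result.append(candidate)
--     return result
-- ===== Notes on version B (the rewrite author's own statement) =====
-- stated objective: simpler
-- what changed: Replaces A's mutating working copy driven by pop(0) with a fixed loop counter, plus a separate post-hoc dedup pass, by a pure double index loop (start i, end j) slicing the untouched list directly and appending each slice inline on first encounter.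
import Mathlib
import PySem

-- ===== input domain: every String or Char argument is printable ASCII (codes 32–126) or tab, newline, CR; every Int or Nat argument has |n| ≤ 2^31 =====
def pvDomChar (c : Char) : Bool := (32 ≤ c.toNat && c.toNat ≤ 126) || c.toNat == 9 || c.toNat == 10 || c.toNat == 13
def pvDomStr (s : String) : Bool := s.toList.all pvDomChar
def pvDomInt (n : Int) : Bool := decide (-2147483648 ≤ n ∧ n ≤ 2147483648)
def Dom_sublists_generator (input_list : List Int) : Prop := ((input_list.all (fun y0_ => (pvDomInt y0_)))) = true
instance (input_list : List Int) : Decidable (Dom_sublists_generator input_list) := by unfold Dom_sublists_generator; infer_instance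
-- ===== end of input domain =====

-- B replaces A's mutating working copy with pop(0) and a post-hoc dedup pass by a
-- direct start/end double index loop with an inline first-occurrence check (simpler).

-- ===== PORT A =====
-- 'for num in range(len(user_list)+1): sublists.append(user_list[:num])'
def aPrefixes (user_list : List Int) : List (List Int) :=
  (PySem.List.pyRange 0 ((user_list.length : Int) + 1) 1).map
    (fun num => PySem.List.slice user_list none (some num))

-- 'while t < loop_counter: … ; t += 1; user_list.pop(0)' — fuel = loop_counter - t;
-- pop(0) is .tail (the list is nonempty at each pop since fuel ≤ its length).
def aLoop : Nat → List Int → List (List Int) → List (List Int)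
  | 0, _, sublists => sublists
  | fuel+1, user_list, sublists =>
      aLoop fuel user_list.tail (sublists ++ aPrefixes user_list)

def sublists_generator (input_list : List Int) : List (List Int) :=
  -- user_list = list(input_list); loop_counter = len(user_list); the while loop:
  let sublists := aLoop input_list.length input_list []
  -- 'for item in sublists: if item not in result: result.append(item)'
  sublists.foldl (fun result item => if item ∈ result then result else result ++ [item]) []

-- ===== PORT B =====
def sublists_generator_alt (input_list : List Int) : List (List Int) :=
  let lst := input_list
  let n := lst.length
  (PySem.List.pyRange 0 (n : Int) 1).foldl (fun result i =>
    (PySem.List.pyRange i ((n : Int) + 1) 1).foldl (fun result j =>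
      let candidate := PySem.List.slice lst (some i) (some j)   -- lst[i:j]
      if candidate ∈ result then result else result ++ [candidate]) result) []

-- ===== PRECONDITION & SPEC =====
def Spec_sublists_generator (input_list : List Int) (out : List (List Int)) : Prop := out = sublists_generator_alt input_list
instance (input_list : List Int) (out : List (List Int)) : Decidable (Spec_sublists_generator input_list out) := by unfold Spec_sublists_generator; infer_instance

-- ===== CLAIM (what is proved, stated in full; the proofs are below) =====
def Claim_equal_sublists_generator : Prop := ∀ (input_list : List Int), Dom_sublists_generator input_list → Spec_sublists_generator input_list (sublists_generator input_list)

-- ===== LEMMAS AND PROOFS =====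

-- the dedup step ('if item not in result: result.append(item)'), shared by both ports
def dStep (result : List (List Int)) (item : List Int) : List (List Int) :=
  if item ∈ result then result else result ++ [item]

-- flat sequence of sublists A generates before dedup
def gen : Nat → List Int → List (List Int)
  | 0, _ => []
  | f+1, ul => aPrefixes ul ++ gen f ul.tail

theorem aLoop_eq_gen (fuel : Nat) (ul : List Int) (sub : List (List Int)) :
    aLoop fuel ul sub = sub ++ gen fuel ul := by
  induction fuel generalizing ul sub with
  | zero => simp [aLoop, gen]
  | succ f ih => simp [aLoop, gen, ih, List.append_assoc]

theorem aPrefixes_eq (ul : List Int) :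
    aPrefixes ul = (List.range (ul.length + 1)).map ul.take := by
  unfold aPrefixes
  rw [show ((ul.length : Int) + 1) = ((ul.length + 1 : Nat) : Int) by push_cast; ring,
      PySem.List.pyRange_zero_natCast]
  simp [List.map_map, Function.comp, PySem.List.slice_to_natCast]

-- B's inner loop candidates, at start index i ≤ n, are exactly the prefixes of lst.drop i
theorem inner_eq (lst : List Int) (i : Nat) (hi : i ≤ lst.length) :
    (PySem.List.pyRange (i : Int) ((lst.length : Int) + 1) 1).map
      (fun j => PySem.List.slice lst (some (i : Int)) (some j))
      = aPrefixes (lst.drop i) := by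
  rw [aPrefixes_eq, PySem.List.pyRange_one, List.map_map]
  have hlen : (((lst.length : Int) + 1 - (i : Int)).toNat) = (lst.drop i).length + 1 := by
    simp [List.length_drop]; omega
  rw [hlen]
  apply List.map_congr_left
  intro k _
  simp [Function.comp, PySem.List.slice_natCast_add]

theorem flatten_eq_gen (lst : List Int) (f i : Nat) (h : i + f = lst.length) :
    ((List.range' i f).map (fun i => aPrefixes (lst.drop i))).flatten = gen f (lst.drop i) := by
  induction f generalizing i with
  | zero => simp [gen]
  | succ f ih =>
      rw [List.range'_succ]
      simp only [List.map_cons, List.flatten_cons, gen]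
      rw [List.tail_drop, ih (i + 1) (by omega)]

theorem foldl_dStep_map {α : Type} (l : List α) (f : α → List Int) (acc : List (List Int)) :
    l.foldl (fun result x => dStep result (f x)) acc = (l.map f).foldl dStep acc := by
  rw [List.foldl_map]

theorem b_eq_foldl_gen (lst : List Int) :
    sublists_generator_alt lst = (gen lst.length lst).foldl dStep [] := by
  unfold sublists_generator_alt
  dsimp only
  rw [PySem.List.pyRange_zero_natCast, List.foldl_map]
  refine Eq.trans (PySem.List.foldl_congr_mem _ _
      (fun result i => (aPrefixes (lst.drop i)).foldl dStep result) [] ?_) ?_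
  · intro acc i hi
    rw [List.mem_range] at hi
    exact (foldl_dStep_map _ _ _).trans (by rw [inner_eq lst i hi.le])
  · rw [show (fun (result : List (List Int)) (i : Nat) => (aPrefixes (lst.drop i)).foldl dStep result)
            = fun result i => ((fun i => aPrefixes (lst.drop i)) i).foldl dStep result from rfl,
        ← List.foldl_map, ← List.foldl_flatten, List.range_eq_range',
        flatten_eq_gen lst lst.length 0 (by omega)]
    simp

theorem a_eq_foldl_gen (lst : List Int) :
    sublists_generator lst = (gen lst.length lst).foldl dStep [] := by
  unfold sublists_generator
  rw [aLoop_eq_gen]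
  rfl

-- ===== VERDICT (by name: the statement is the Claim_ definition above) =====
theorem sublists_generator_spec : Claim_equal_sublists_generator := by
  intro input_list _
  unfold Spec_sublists_generator
  rw [a_eq_foldl_gen, b_eq_foldl_gen]
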